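-- pv_equiv track=rewrite | github.com/scduffy/DiscordBot | bot.py | memeify
-- ===== SOURCE A (Python) =====
-- def memeify(string):
--     memed_string = ""
--     string = string.lower()
--     string = string.strip()
--     for i in range(len(string)):
--         if string[i] == " " or string[i] == "?" or string[i] == "!" or string[i] == "." or string[i] == "\"" or string[i] == "," or string[i] == "'" or string[i] == "’" or string[i] == ":" or string[i] == ";" or string[i] == "-":
--             memed_string = " " + memed_string
--         elif string[i] == "b":
--             memed_string = memed_string + " :b:"
--         else:
--             memed_string = memed_string + " :regional_indicator_" + string[i] + ":"
--     return memed_string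
-- ===== SOURCE B (Python) =====
-- PUNCT = set(" ?!.\",'\u2019:;-")
--
-- def memeify(string):
--     s = string.lower().strip()
--     spaces = " " * sum(1 for c in s if c in PUNCT)
--     body = "".join(" :b:" if c == "b" else " :regional_indicator_" + c + ":"
--                    for c in s if c not in PUNCT)
--     return spaces + body
-- ===== Notes on version B (the rewrite author's own statement) =====
-- stated objective: faster
-- what changed: A's single interleaved accumulator (punctuation prepends a space, other chars append a fragment) is replaced by two independent passes: count the punctuation characters for the leading spaces, then map/join the remaining characters in order.
import Mathlib
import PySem

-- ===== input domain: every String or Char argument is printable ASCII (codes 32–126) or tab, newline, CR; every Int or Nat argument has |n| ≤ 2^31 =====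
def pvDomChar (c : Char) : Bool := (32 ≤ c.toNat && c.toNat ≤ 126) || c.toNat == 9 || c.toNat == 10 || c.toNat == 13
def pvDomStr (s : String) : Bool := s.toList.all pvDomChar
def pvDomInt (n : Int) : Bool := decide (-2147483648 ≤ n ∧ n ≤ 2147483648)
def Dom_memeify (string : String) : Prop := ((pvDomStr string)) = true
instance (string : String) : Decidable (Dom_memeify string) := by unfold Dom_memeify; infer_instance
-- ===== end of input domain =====

-- B replaces A's single interleaved prepend/append accumulator (quadratic repeated string
-- concatenation) by two independent passes: count the punctuation for the leading spaces,
-- then map/join the remaining characters in order; measured faster at large sizes.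

-- ===== PORT A =====
-- A's loop: one accumulator, punctuation prepends a space, letters append a fragment.
def memeify (string : String) : String :=
  let s := PySem.Chars.strip (PySem.Chars.lower string.toList)
  String.ofList (s.foldl (fun memed c =>
    if c == ' ' || c == '?' || c == '!' || c == '.' || c == '"' || c == ',' || c == '\'' || c == '’' || c == ':' || c == ';' || c == '-' then
      ' ' :: memed
    else if c == 'b' then
      memed ++ " :b:".toList
    else
      memed ++ " :regional_indicator_".toList ++ [c] ++ [':']) [])

-- ===== PORT B =====
def memePunct : List Char := [' ', '?', '!', '.', '"', ',', '\'', '’', ':', ';', '-']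

def memeify_alt (string : String) : String :=
  let s := PySem.Chars.strip (PySem.Chars.lower string.toList)
  let spaces := List.replicate (s.countP (fun c => memePunct.contains c)) ' '
  let body := (s.filter (fun c => !(memePunct.contains c))).flatMap (fun c =>
    if c == 'b' then " :b:".toList else " :regional_indicator_".toList ++ [c] ++ [':'])
  String.ofList (spaces ++ body)

-- ===== PRECONDITION & SPEC =====
def Spec_memeify (string : String) (out : String) : Prop := out = memeify_alt string
instance (string : String) (out : String) : Decidable (Spec_memeify string out) := by unfold Spec_memeify; infer_instance

-- ===== CLAIM (what is proved, stated in full; the proofs are below) =====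
def Claim_equal_memeify : Prop := ∀ (string : String), Dom_memeify string → Spec_memeify string (memeify string)

-- ===== LEMMAS AND PROOFS =====

-- A's or-chain and B's membership test agree on every character.
theorem memePunct_eq (c : Char) :
    (c == ' ' || c == '?' || c == '!' || c == '.' || c == '"' || c == ',' || c == '\'' || c == '’' || c == ':' || c == ';' || c == '-')
      = memePunct.contains c := by
  simp [memePunct, beq_eq_decide, Bool.or_assoc]

-- Invariant of A's loop: spaces collect in front, fragments keep order.
theorem memeify_loop (l : List Char) (m : List Char) :
    l.foldl (fun memed c =>
      if c == ' ' || c == '?' || c == '!' || c == '.' || c == '"' || c == ',' || c == '\'' || c == '’' || c == ':' || c == ';' || c == '-' then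
        ' ' :: memed
      else if c == 'b' then
        memed ++ " :b:".toList
      else
        memed ++ " :regional_indicator_".toList ++ [c] ++ [':']) m
    = List.replicate (l.countP (fun c => memePunct.contains c)) ' ' ++ m ++
      (l.filter (fun c => !(memePunct.contains c))).flatMap (fun c =>
        if c == 'b' then " :b:".toList else " :regional_indicator_".toList ++ [c] ++ [':']) := by
  induction l generalizing m with
  | nil => simp
  | cons c t ih =>
    simp only [List.foldl_cons, memePunct_eq c, List.countP_cons, List.filter_cons]
    by_cases h : memePunct.contains c = true
    · rw [if_pos h, ih]
      have hm : c ∈ memePunct := by simpa using h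
      simp [hm, List.replicate_succ', List.append_assoc]
    · rw [if_neg h, ih]
      have h' : c ∉ memePunct := by simpa using h
      by_cases hb : c = 'b'
      · subst hb; simp [h', List.append_assoc]
      · simp [h', hb, List.append_assoc]

-- ===== VERDICT (by name: the statement is the Claim_ definition above) =====
theorem memeify_spec : Claim_equal_memeify := by
  intro string _
  unfold Spec_memeify memeify memeify_alt
  simp only [memeify_loop]
  simp
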